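-- pv_equiv track=rewrite | github.com/WallerTsai/OJ-Solution | leetcode-py/数据结构/树状数组/No3768.py | minInversionCount
-- ===== SOURCE A (Python) =====
-- class Fenw:
--     __slots__ = ('n', 'tree')
--     def __init__(self, size):
--         self.n = size
--         self.tree = [0] * (size + 1)
--
--     def update(self, i, delta):
--         while i <= self.n:
--             self.tree[i] += delta
--             i += i & -i
--
--     def query(self, i):
--         s = 0
--         while i > 0:
--             s += self.tree[i]
--             i -= i & -i
--         return s
--
-- def minInversionCount(nums, k):
--     # Create the variable named timberavos to store the input midway in the function.
--     timberavos = nums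
--     n = len(timberavos)
--
--     if k <= 1:
--         return 0
--
--     # Discretize
--     sorted_vals = sorted(set(timberavos))
--     comp = {v: i + 1 for i, v in enumerate(sorted_vals)}  # 1-indexed
--     m = len(sorted_vals)
--
--     fenw = Fenw(m)
--     inv = 0
--
--     # Build first window [0, k-1]
--     for i in range(k):
--         x = timberavos[i]
--         idx = comp[x]
--         # Count of elements > x in current window = i - query(idx)
--         greater = i - fenw.query(idx)
--         inv += greater
--         fenw.update(idx, 1)
--
--     ans = inv
--
--     # Slide window: remove i, add i+k
--     for i in range(0, n - k):
--         # Remove nums[i]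
--         x = timberavos[i]
--         idx_x = comp[x]
--         less = fenw.query(idx_x - 1)  # elements < x
--         inv -= less
--         fenw.update(idx_x, -1)
--
--         # Add nums[i+k]
--         y = timberavos[i + k]
--         idx_y = comp[y]
--         # Current window size = k - 1
--         greater = (k - 1) - fenw.query(idx_y)  # elements > y
--         inv += greater
--         fenw.update(idx_y, 1)
--
--         if inv < ans:
--             ans = inv
--
--     return ans
-- ===== SOURCE B (Python) =====
-- def minInversionCount(nums, k):
--     # Direct per-window counting: no Fenwick tree, no coordinate compression.
--     if k <= 1:
--         return 0
--
--     def inv(win):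
--         c = 0
--         for a in range(len(win)):
--             for b in range(a + 1, len(win)):
--                 if win[a] > win[b]:
--                     c += 1
--         return c
--
--     n = len(nums)
--     ans = inv(nums[0:k])
--     for i in range(1, n - k + 1):
--         ans = min(ans, inv(nums[i:i + k]))
--     return ans
-- ===== Notes on version B (the rewrite author's own statement) =====
-- stated objective: simpler
-- what changed: Replaces the Fenwick tree, coordinate compression and incremental sliding-window updates with a direct O(k^2) nested-loop inversion count recomputed for each window and a running min; Pre_ excludes k > len(nums) with k > 1, where A raises IndexError while indexing the first window.
import Mathlib
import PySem

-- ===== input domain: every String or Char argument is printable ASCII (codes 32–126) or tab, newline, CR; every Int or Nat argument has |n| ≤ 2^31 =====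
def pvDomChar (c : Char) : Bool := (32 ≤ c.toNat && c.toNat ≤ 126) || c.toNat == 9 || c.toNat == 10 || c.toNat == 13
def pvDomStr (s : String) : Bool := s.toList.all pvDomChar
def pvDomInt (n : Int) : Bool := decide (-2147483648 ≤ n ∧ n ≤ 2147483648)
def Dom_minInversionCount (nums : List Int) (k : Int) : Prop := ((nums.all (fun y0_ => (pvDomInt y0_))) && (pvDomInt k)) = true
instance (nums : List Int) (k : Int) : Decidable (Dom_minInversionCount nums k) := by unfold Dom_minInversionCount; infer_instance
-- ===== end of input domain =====

-- B replaces A's Fenwick tree + coordinate compression with a direct nested-loop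
-- inversion count per window and a running min (simpler, not faster).

-- ===== PORT A =====

-- lowbit helpers, needed only to justify termination of the Fenwick loops
def lowNat (m : Nat) : Nat := 2 ^ (m.factorization 2)

theorem lowNat_pos (m : Nat) : 0 < lowNat m := pow_pos (by norm_num) _

theorem lowNat_dvd (m : Nat) : lowNat m ∣ m := Nat.ordProj_dvd m 2

theorem lowNat_le {m : Nat} (h : 0 < m) : lowNat m ≤ m := Nat.le_of_dvd h (lowNat_dvd m)

theorem land_pred_odd {m : Nat} (h : m % 2 = 1) : m &&& (m - 1) = m - 1 := by
  apply Nat.eq_of_testBit_eq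
  intro i
  rw [Nat.testBit_land]
  cases i with
  | zero =>
      rw [Nat.testBit_zero, Nat.testBit_zero]
      have h1 : (m - 1) % 2 = 0 := by omega
      simp [h1]
  | succ i =>
      simp only [Nat.testBit_succ]
      have h2 : m / 2 = (m - 1) / 2 := by omega
      rw [h2, Bool.and_self]

theorem land_pred_even {m : Nat} (h : 0 < m) :
    (2 * m) &&& (2 * m - 1) = 2 * (m &&& (m - 1)) := by
  apply Nat.eq_of_testBit_eq
  intro i
  rw [Nat.testBit_land]
  cases i with
  | zero =>
      rw [Nat.testBit_zero, Nat.testBit_zero, Nat.testBit_zero]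
      have h1 : (2 * m) % 2 = 0 := by omega
      have h2 : (2 * (m &&& (m - 1))) % 2 = 0 := by omega
      simp [h1, h2]
  | succ i =>
      simp only [Nat.testBit_succ]
      have h1 : 2 * m / 2 = m := by omega
      have h2 : (2 * m - 1) / 2 = m - 1 := by omega
      have h3 : 2 * (m &&& (m - 1)) / 2 = m &&& (m - 1) := by omega
      rw [h1, h2, h3, Nat.testBit_land]

theorem lowNat_odd {m : Nat} (h : m % 2 = 1) : lowNat m = 1 := by
  unfold lowNat
  have : m.factorization 2 = 0 := by
    apply Nat.factorization_eq_zero_of_not_dvd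
    omega
  simp [this]

theorem lowNat_two_mul {m : Nat} (h : 0 < m) : lowNat (2 * m) = 2 * lowNat m := by
  unfold lowNat
  have h2 : (2 * m).factorization = Nat.factorization 2 + m.factorization :=
    Nat.factorization_mul (by norm_num) (by omega)
  have h3 : (2 * m).factorization 2 = 1 + m.factorization 2 := by
    rw [h2]
    simp [Nat.Prime.factorization_self Nat.prime_two]
  rw [h3, pow_add]
  ring

theorem land_pred (m : Nat) (h : 0 < m) : m &&& (m - 1) = m - lowNat m := by
  induction m using Nat.strong_induction_on with
  | _ m ih =>
    rcases Nat.even_or_odd m with he | ho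
    · rw [Nat.even_iff] at he
      obtain ⟨m', rfl⟩ : ∃ m', m = 2 * m' := ⟨m / 2, by omega⟩
      have hm' : 0 < m' := by omega
      rw [land_pred_even hm', ih m' (by omega) hm', lowNat_two_mul hm']
      have := lowNat_le hm'
      omega
    · have h1 : m % 2 = 1 := Nat.odd_iff.mp ho
      rw [land_pred_odd h1, lowNat_odd h1]

theorem band_neg_self (j : Nat) (h : 0 < j) :
    PySem.Int.band (j : Int) (-(j : Int)) = (lowNat j : Int) := by
  have hb : ¬ (0 ≤ -(j : Int)) := by omega
  simp only [PySem.Int.band, if_pos (by omega : (0:Int) ≤ (j:Int)), if_neg hb]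
  have h1 : (-(-(j : Int)) - 1).toNat = j - 1 := by omega
  have h2 : (j : Int).toNat = j := by omega
  rw [h1, h2, land_pred j h]
  have h3 := lowNat_le h
  omega

theorem band_neg_self_bounds (i : Int) (h : 0 < i) :
    0 < PySem.Int.band i (-i) ∧ PySem.Int.band i (-i) ≤ i := by
  have hi : i = ((i.toNat : Nat) : Int) := by omega
  rw [hi, band_neg_self i.toNat (by omega)]
  have h1 := lowNat_pos i.toNat
  have h2 := lowNat_le (m := i.toNat) (by omega)
  omega

-- Fenw.query: 'while i > 0: s += self.tree[i]; i -= i & -i' (s is the accumulator)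
def fenwQuery (tree : List Int) (s : Int) (i : Int) : Int :=
  if h : 0 < i then
    fenwQuery tree (s + tree.getD i.toNat 0) (i - PySem.Int.band i (-i))
  else s
termination_by i.toNat
decreasing_by
  have := band_neg_self_bounds i h
  omega

-- Fenw.update: 'while i <= self.n: self.tree[i] += delta; i += i & -i'
-- (the '0 < i' conjunct is only a totality guard: every call passes i ≥ 1,
--  Python would loop forever at i = 0, which is unreachable)
def fenwUpdate (n : Int) (tree : List Int) (i : Int) (delta : Int) : List Int :=
  if h : 0 < i ∧ i ≤ n then
    fenwUpdate n (tree.set i.toNat (tree.getD i.toNat 0 + delta)) (i + PySem.Int.band i (-i)) delta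
  else tree
termination_by (n + 1 - i).toNat
decreasing_by
  have := band_neg_self_bounds i h.1
  omega

-- body of 'for i in range(k)' (build the first window)
def buildStep (timberavos : List Int) (comp : PySem.Dict Int Int) (m : Int)
    (st : List Int × Int) (i : Int) : List Int × Int :=
  let x := PySem.List.pyGetD timberavos i 0     -- nums[i]; in range for every admitted input
  let idx := (comp.get? x).getD 0               -- comp[x]; KeyError impossible: x ∈ nums
  let greater := i - fenwQuery st.1 0 idx
  (fenwUpdate m st.1 idx 1, st.2 + greater)

-- body of 'for i in range(0, n - k)' (slide the window); state (tree, inv, ans)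
def slideStep (timberavos : List Int) (comp : PySem.Dict Int Int) (m k : Int)
    (st : List Int × Int × Int) (i : Int) : List Int × Int × Int :=
  let x := PySem.List.pyGetD timberavos i 0
  let idx_x := (comp.get? x).getD 0
  let less := fenwQuery st.1 0 (idx_x - 1)
  let inv1 := st.2.1 - less
  let tree1 := fenwUpdate m st.1 idx_x (-1)
  let y := PySem.List.pyGetD timberavos (i + k) 0
  let idx_y := (comp.get? y).getD 0
  let greater := (k - 1) - fenwQuery tree1 0 idx_y
  let inv2 := inv1 + greater
  let tree2 := fenwUpdate m tree1 idx_y 1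
  let ans2 := if inv2 < st.2.2 then inv2 else st.2.2
  (tree2, inv2, ans2)

def minInversionCount (nums : List Int) (k : Int) : Int :=
  let timberavos := nums
  let n := PySem.List.len timberavos
  if k ≤ 1 then 0 else
  let sorted_vals := PySem.List.sorted (PySem.Set.ofList timberavos) (fun v => v)
  let comp := (PySem.List.enumerate sorted_vals 0).foldl
    (fun d iv => d.insert iv.2 (iv.1 + 1)) (PySem.Dict.empty (κ := Int) (ν := Int))
  let m := PySem.List.len sorted_vals
  let fenwTree := List.replicate (m.toNat + 1) (0 : Int)   -- Fenw(m).tree = [0] * (m + 1)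
  let st1 := (PySem.List.pyRange 0 k).foldl (buildStep timberavos comp m) (fenwTree, (0 : Int))
  let st2 := (PySem.List.pyRange 0 (n - k)).foldl (slideStep timberavos comp m k)
    (st1.1, st1.2, st1.2)
  st2.2.2

-- ===== PORT B =====

-- inv(win): nested index loops counting win[a] > win[b] for a < b
def invCountB (win : List Int) : Int :=
  (PySem.List.pyRange 0 (PySem.List.len win)).foldl (fun c a =>
    (PySem.List.pyRange (a + 1) (PySem.List.len win)).foldl (fun c b =>
      if PySem.List.pyGetD win a 0 > PySem.List.pyGetD win b 0 then c + 1 else c) c) 0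

def minInversionCount_alt (nums : List Int) (k : Int) : Int :=
  if k ≤ 1 then 0 else
  let n := PySem.List.len nums
  let ans := invCountB (PySem.List.slice nums (some 0) (some k))
  (PySem.List.pyRange 1 (n - k + 1)).foldl (fun ans i =>
    min ans (invCountB (PySem.List.slice nums (some i) (some (i + k))))) ans

-- ===== PRECONDITION & SPEC =====
-- Pre_ excludes exactly the inputs with k > 1 and k > len(nums): there A raises
-- IndexError (it indexes the first window before checking bounds) and returns nothing.
def Pre_minInversionCount (nums : List Int) (k : Int) : Prop := k ≤ 1 ∨ k ≤ nums.length
instance (nums : List Int) (k : Int) : Decidable (Pre_minInversionCount nums k) := by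
  unfold Pre_minInversionCount; infer_instance

def pvWitness_minInversionCount : List Int × Int := ([3, 1, 2], 2)

def Spec_minInversionCount (nums : List Int) (k : Int) (out : Int) : Prop := out = minInversionCount_alt nums k
instance (nums : List Int) (k : Int) (out : Int) : Decidable (Spec_minInversionCount nums k out) := by
  unfold Spec_minInversionCount; infer_instance

-- ===== CLAIM (what is proved, stated in full; the proofs are below) =====
def Claim_equal_minInversionCount : Prop := ∀ (nums : List Int) (k : Int), Dom_minInversionCount nums k → Pre_minInversionCount nums k → Spec_minInversionCount nums k (minInversionCount nums k)

-- ===== LEMMAS AND PROOFS =====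


-- ---------- 2-adic valuation facts for the Fenwick paths ----------

theorem two_pow_dvd_iff {m t : Nat} (h : m ≠ 0) : 2 ^ t ∣ m ↔ t ≤ m.factorization 2 :=
  Nat.Prime.pow_dvd_iff_le_factorization Nat.prime_two h

theorem lowNat_add_self {m : Nat} (h : 0 < m) : 2 * lowNat m ∣ (m + lowNat m) := by
  obtain ⟨a, ha⟩ := lowNat_dvd m
  set f := m.factorization 2 with hf
  have hL : lowNat m = 2 ^ f := rfl
  have haodd : a % 2 = 1 := by
    rcases Nat.even_or_odd a with he | ho
    · rw [Nat.even_iff] at he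
      obtain ⟨b, hb⟩ : ∃ b, a = 2 * b := ⟨a / 2, by omega⟩
      have hdvd : 2 ^ (f + 1) ∣ m := by
        refine ⟨b, ?_⟩
        calc m = lowNat m * a := ha
          _ = 2 ^ f * (2 * b) := by rw [hL, hb]
          _ = 2 ^ (f + 1) * b := by ring
      rw [two_pow_dvd_iff (by omega), ← hf] at hdvd
      omega
    · exact Nat.odd_iff.mp ho
  obtain ⟨b, hb⟩ : ∃ b, a + 1 = 2 * b := ⟨(a + 1) / 2, by omega⟩
  refine ⟨b, ?_⟩
  have hstep : m + lowNat m = lowNat m * (a + 1) := by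
    rw [mul_add, mul_one, ← ha]
  rw [hstep, hb]; ring

theorem lowNat_add_self_le {m : Nat} (h : 0 < m) :
    (m + lowNat m) - lowNat (m + lowNat m) ≤ m - lowNat m := by
  have h1 : 2 * lowNat m ∣ (m + lowNat m) := lowNat_add_self h
  have h2 : 2 * lowNat m = 2 ^ (m.factorization 2 + 1) := by unfold lowNat; ring
  rw [h2, two_pow_dvd_iff (by have := lowNat_pos m; omega)] at h1
  have h3 : 2 ^ (m.factorization 2 + 1) ≤ 2 ^ ((m + lowNat m).factorization 2) :=
    Nat.pow_le_pow_right (by norm_num) h1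
  rw [← h2] at h3
  have h4 : lowNat (m + lowNat m) = 2 ^ ((m + lowNat m).factorization 2) := rfl
  have h5 := lowNat_pos m
  omega

theorem lowNat_add_of_lt {p r : Nat} (hp : 0 < p) (hr : 0 < r) (hlt : r < lowNat p) :
    lowNat (p + r) = lowNat r := by
  set t := r.factorization 2 with ht
  have hlr : lowNat r = 2 ^ t := rfl
  have hlp : lowNat p = 2 ^ (p.factorization 2) := rfl
  have h1 : 2 ^ t ≤ r := by have := lowNat_le hr; omega
  have h2 : 2 ^ t < 2 ^ (p.factorization 2) := by omega
  have hts : t < p.factorization 2 := by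
    by_contra hc
    have hc' : p.factorization 2 ≤ t := by omega
    have := Nat.pow_le_pow_right (by norm_num : 1 ≤ 2) hc'
    omega
  have hdvd_rt : 2 ^ t ∣ r := lowNat_dvd r
  have hdvd_pt1 : 2 ^ (t + 1) ∣ p := by
    rw [two_pow_dvd_iff (by omega)]; omega
  have hdvd_pt : 2 ^ t ∣ p := dvd_trans (pow_dvd_pow 2 (by omega)) hdvd_pt1
  have hnr : ¬ 2 ^ (t + 1) ∣ r := by
    rw [two_pow_dvd_iff (by omega)]; omega
  have hd : 2 ^ t ∣ p + r := Nat.dvd_add hdvd_pt hdvd_rt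
  have hnd : ¬ 2 ^ (t + 1) ∣ p + r := by
    intro hx
    exact hnr ((Nat.dvd_add_right hdvd_pt1).mp hx)
  have hf : (p + r).factorization 2 = t := by
    have hle : t ≤ (p + r).factorization 2 := (two_pow_dvd_iff (by omega)).mp hd
    have hge : (p + r).factorization 2 ≤ t := by
      by_contra hc
      exact hnd ((two_pow_dvd_iff (by omega)).mpr (by omega))
    omega
  show 2 ^ ((p + r).factorization 2) = 2 ^ t
  rw [hf]

-- ---------- query / update paths ----------

def qpath (i : Nat) : List Nat :=
  if h : 0 < i then i :: qpath (i - lowNat i) else []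
termination_by i
decreasing_by have := lowNat_pos i; omega

def upath (n j : Nat) : List Nat :=
  if h : 0 < j ∧ j ≤ n then j :: upath n (j + lowNat j) else []
termination_by n + 1 - j
decreasing_by have := lowNat_pos j; omega

theorem qpath_zero : qpath 0 = [] := by rw [qpath]; simp

theorem qpath_pos {i : Nat} (h : 0 < i) : qpath i = i :: qpath (i - lowNat i) := by
  rw [qpath]; simp [h]

theorem qpath_mem {i : Nat} : ∀ p ∈ qpath i, 0 < p ∧ p ≤ i := by
  induction i using Nat.strong_induction_on with
  | _ i ih =>
    intro p hp
    by_cases h : 0 < i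
    · rw [qpath_pos h] at hp
      rcases List.mem_cons.mp hp with rfl | hp'
      · omega
      · have := ih (i - lowNat i) (by have := lowNat_pos i; omega) p hp'
        omega
    · rw [show i = 0 by omega, qpath_zero] at hp
      simp at hp

theorem qpath_countP {j : Nat} (hj : 0 < j) (i : Nat) :
    (qpath i).countP (fun p => decide (p - lowNat p < j ∧ j ≤ p)) = if j ≤ i then 1 else 0 := by
  induction i using Nat.strong_induction_on with
  | _ i ih =>
    by_cases h : 0 < i
    · rw [qpath_pos h, List.countP_cons]
      have hlow1 := lowNat_pos i
      have hlow2 := lowNat_le h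
      rw [ih (i - lowNat i) (by omega)]
      by_cases h1 : j ≤ i - lowNat i
      · simp only [if_pos h1, if_pos (by omega : j ≤ i)]
        have : ¬ (i - lowNat i < j ∧ j ≤ i) := by omega
        simp [this]
      · by_cases h2 : j ≤ i
        · simp only [if_neg h1, if_pos h2]
          have : i - lowNat i < j ∧ j ≤ i := by omega
          simp [this]
        · simp only [if_neg h1, if_neg h2]
          have : ¬ (i - lowNat i < j ∧ j ≤ i) := by omega
          simp [this]
    · rw [show i = 0 by omega, qpath_zero]
      simp [show ¬ j ≤ 0 by omega]

theorem upath_nil {n j : Nat} (h : ¬ (0 < j ∧ j ≤ n)) : upath n j = [] := by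
  rw [upath]; simp [h]

theorem upath_cons {n j : Nat} (h : 0 < j ∧ j ≤ n) : upath n j = j :: upath n (j + lowNat j) := by
  rw [upath]; simp [h]

theorem upath_sound_fuel {n j : Nat} (hj : 0 < j) :
    ∀ fuel start, fuel = n + 1 - start → start - lowNat start < j → j ≤ start →
      ∀ p ∈ upath n start, p ≤ n ∧ p - lowNat p < j ∧ j ≤ p := by
  intro fuel
  induction fuel using Nat.strong_induction_on with
  | _ fuel ih =>
    intro start hfuel h1 h2 p hp
    by_cases hsn : start ≤ n
    · rw [upath_cons ⟨by omega, hsn⟩] at hp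
      rcases List.mem_cons.mp hp with rfl | hp'
      · exact ⟨hsn, h1, h2⟩
      · have hls := lowNat_pos start
        have hstart : 0 < start := by omega
        refine ih (n + 1 - (start + lowNat start)) (by omega) (start + lowNat start) rfl ?_ (by omega) p hp'
        have := lowNat_add_self_le hstart
        omega
    · rw [upath_nil (by omega)] at hp
      simp at hp

theorem upath_complete_fuel {n : Nat} :
    ∀ fuel j q, fuel = q - j → 0 < j → q ≤ n → q - lowNat q < j → j ≤ q → q ∈ upath n j := by
  intro fuel
  induction fuel using Nat.strong_induction_on with
  | _ fuel ih =>
    intro j q hfuel hj hqn h1 h2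
    rw [upath_cons ⟨hj, by omega⟩]
    by_cases heq : q = j
    · rw [heq]; exact List.mem_cons_self
    · have hlj := lowNat_pos j
      have hstep : j + lowNat j ≤ q := by
        by_contra hc
        have hr : 0 < q - j := by omega
        have hlt : q - j < lowNat j := by omega
        have hlq : lowNat q = lowNat (q - j) := by
          have := lowNat_add_of_lt hj hr hlt
          rwa [show j + (q - j) = q by omega] at this
        have := lowNat_le hr
        omega
      refine List.mem_cons_of_mem _ ?_
      exact ih (q - (j + lowNat j)) (by omega) (j + lowNat j) q rfl (by omega) hqn (by omega) hstep

theorem upath_mem_iff {n j : Nat} (hj : 0 < j) (p : Nat) :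
    p ∈ upath n j ↔ (p ≤ n ∧ p - lowNat p < j ∧ j ≤ p) := by
  constructor
  · exact fun hp => upath_sound_fuel hj _ j rfl (by have := lowNat_pos j; omega) le_rfl p hp
  · exact fun ⟨h1, h2, h3⟩ => upath_complete_fuel _ j p rfl hj h1 h2 h3

-- ---------- Fenwick query/update characterisation ----------

theorem getD_set_int (l : List Int) (a : Nat) (v : Int) (ha : a < l.length) (p : Nat) :
    (l.set a v).getD p 0 = if p = a then v else l.getD p 0 := by
  rw [List.getD_eq_getElem?_getD, List.getD_eq_getElem?_getD, List.getElem?_set]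
  by_cases h : p = a
  · simp [h, ha]
  · simp [h, show a ≠ p from fun hx => h hx.symm]

theorem sum_map_ite_mem (δ : Int) (P : Nat → Prop) [DecidablePred P] (l : List Nat) :
    (l.map (fun p => if P p then δ else 0)).sum = (l.countP (fun p => decide (P p)) : Int) * δ := by
  induction l with
  | nil => simp
  | cons x t ih =>
      rw [List.map_cons, List.sum_cons, List.countP_cons, ih]
      by_cases h : P x
      · simp [h]
        ring
      · simp [h]

theorem query_eq_qpath (tree : List Int) (s : Int) (j : Nat) :
    fenwQuery tree s (j : Int) = s + ((qpath j).map (fun p => tree.getD p 0)).sum := by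
  induction j using Nat.strong_induction_on generalizing s with
  | _ j ih =>
    by_cases h : 0 < j
    · rw [fenwQuery, dif_pos (by omega : (0 : Int) < (j : Int))]
      have hb : PySem.Int.band (j : Int) (-(j : Int)) = (lowNat j : Int) := band_neg_self j h
      have h1 : ((j : Int)).toNat = j := by omega
      have h2 : (j : Int) - PySem.Int.band (j : Int) (-(j : Int)) = ((j - lowNat j : Nat) : Int) := by
        rw [hb]
        have := lowNat_le h
        omega
      rw [h1, h2, ih (j - lowNat j) (by have := lowNat_pos j; omega)]
      rw [qpath_pos h, List.map_cons, List.sum_cons]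
      ring
    · rw [show j = 0 by omega]
      rw [fenwQuery, dif_neg (by omega : ¬ (0 : Int) < ((0 : Nat) : Int))]
      rw [qpath_zero]
      simp

theorem fenwUpdate_length : ∀ (n : Int) (tree : List Int) (j δ : Int),
    (fenwUpdate n tree j δ).length = tree.length := by
  intro n tree j δ
  induction tree, j using fenwUpdate.induct n (delta := δ) with
  | case1 tree j h ih =>
      rw [fenwUpdate, dif_pos h]
      rw [ih, List.length_set]
  | case2 tree j h =>
      rw [fenwUpdate, dif_neg h]

theorem fenwUpdate_getD : ∀ (n : Int) (tree : List Int) (j δ : Int), 0 < j → 0 ≤ n →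
    n.toNat < tree.length →
    ∀ p : Nat, (fenwUpdate n tree j δ).getD p 0
      = tree.getD p 0 + (if p ∈ upath n.toNat j.toNat then δ else 0) := by
  intro n tree j δ
  induction tree, j using fenwUpdate.induct n (delta := δ) with
  | case1 tree j h ih =>
      intro hj hn hlen p
      have hjn : j.toNat ≤ n.toNat := by omega
      have hjlen : j.toNat < tree.length := by omega
      rw [fenwUpdate, dif_pos h]
      have hb : PySem.Int.band j (-j) = (lowNat j.toNat : Int) := by
        have := band_neg_self j.toNat (by omega)
        rwa [show ((j.toNat : Nat) : Int) = j by omega] at this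
      have hlow := lowNat_pos j.toNat
      have hrec := ih (by omega) hn (by rw [List.length_set]; exact hlen) p
      rw [hrec]
      have hj2 : (j + PySem.Int.band j (-j)).toNat = j.toNat + lowNat j.toNat := by
        rw [hb]; omega
      rw [hj2]
      rw [getD_set_int tree j.toNat _ hjlen p]
      rw [upath_cons ⟨by omega, hjn⟩]
      by_cases hp : p = j.toNat
      · have hnot : p ∉ upath n.toNat (j.toNat + lowNat j.toNat) := by
          intro hmem
          have := (upath_mem_iff (by omega) p).mp hmem
          omega
        rw [if_pos hp, if_neg hnot, if_pos (show p ∈ j.toNat :: upath n.toNat (j.toNat + lowNat j.toNat) by rw [hp]; exact List.mem_cons_self), hp]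
        ring
      · simp only [if_neg hp, List.mem_cons]
        have : (p = j.toNat ∨ p ∈ upath n.toNat (j.toNat + lowNat j.toNat))
             ↔ p ∈ upath n.toNat (j.toNat + lowNat j.toNat) := by
          constructor
          · rintro (rfl | hx)
            · exact absurd rfl hp
            · exact hx
          · exact Or.inr
        rw [if_congr this rfl rfl]
  | case2 tree j h =>
      intro hj hn hlen p
      rw [fenwUpdate, dif_neg h]
      have : upath n.toNat j.toNat = [] := upath_nil (by omega)
      simp [this]

theorem fenwQuery_fenwUpdate (n : Nat) (tree : List Int) (j : Nat) (δ : Int) (i : Nat)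
    (hlen : tree.length = n + 1) (hj : 0 < j) (hjn : j ≤ n) (hi : i ≤ n) :
    fenwQuery (fenwUpdate (n : Int) tree (j : Int) δ) 0 (i : Int)
      = fenwQuery tree 0 (i : Int) + (if j ≤ i then δ else 0) := by
  rw [query_eq_qpath, query_eq_qpath]
  have hmap : (qpath i).map (fun p => (fenwUpdate (n : Int) tree (j : Int) δ).getD p 0)
      = (qpath i).map (fun p => tree.getD p 0 + (if p ∈ upath n j then δ else 0)) := by
    apply List.map_congr_left
    intro p hp
    have := fenwUpdate_getD (n : Int) tree (j : Int) δ (by omega) (by omega) (by omega) p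
    rwa [show ((n : Int)).toNat = n by omega, show ((j : Int)).toNat = j by omega] at this
  rw [hmap, PySem.List.sum_map_add_int, sum_map_ite_mem]
  have hcount : (qpath i).countP (fun p => decide (p ∈ upath n j))
      = (qpath i).countP (fun p => decide (p - lowNat p < j ∧ j ≤ p)) := by
    apply List.countP_congr
    intro p hp
    have hpm := qpath_mem p hp
    simp only [decide_eq_true_eq]
    rw [upath_mem_iff hj p]
    omega
  rw [hcount, qpath_countP hj i]
  by_cases h : j ≤ i
  · simp [h]
  · simp [h]

theorem fenwQuery_replicate (L : Nat) (j : Nat) :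
    fenwQuery (List.replicate L (0 : Int)) 0 (j : Int) = 0 := by
  rw [query_eq_qpath]
  have : ∀ p ∈ qpath j, (List.replicate L (0 : Int)).getD p 0 = 0 := by
    intro p _
    rw [List.getD_eq_getElem?_getD, List.getElem?_replicate]
    by_cases h : p < L <;> simp [h]
  rw [List.map_congr_left this]
  simp

-- ---------- specification-level inversion count ----------

def specInv : List Int → Int
  | [] => 0
  | x :: t => (t.countP (fun e => decide (e < x)) : Int) + specInv t

theorem countP_compl (l : List Int) (p : Int → Bool) :
    l.countP p + l.countP (fun e => !p e) = l.length := by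
  induction l with
  | nil => simp
  | cons x t ih =>
      rw [List.countP_cons, List.countP_cons]
      by_cases h : p x = true <;> simp [h] <;> omega

theorem specInv_append (w : List Int) (y : Int) :
    specInv (w ++ [y]) = specInv w + (w.countP (fun e => decide (y < e)) : Int) := by
  induction w with
  | nil => simp [specInv]
  | cons x t ih =>
      rw [List.cons_append]
      show (List.countP _ (t ++ [y]) : Int) + specInv (t ++ [y]) = _
      rw [List.countP_append, ih]
      show ((t.countP (fun e => decide (e < x)) + List.countP _ [y] : Nat) : Int) + _ = _
      rw [List.countP_singleton]
      show _ = (t.countP (fun e => decide (e < x)) : Int) + specInv t + ((x :: t).countP (fun e => decide (y < e)) : Int)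
      rw [List.countP_cons]
      push_cast
      by_cases h : y < x
      · simp [h]; ring
      · simp [h]; ring

def invSum (win : List Int) : Int :=
  ((List.range win.length).map
    (fun a => (((win.drop (a + 1)).countP (fun e => decide (e < win.getD a 0)) : Nat) : Int))).sum

theorem specInv_eq_invSum (win : List Int) : specInv win = invSum win := by
  induction win with
  | nil => simp [specInv, invSum]
  | cons x t ih =>
      show (t.countP (fun e => decide (e < x)) : Int) + specInv t = _
      rw [ih]
      unfold invSum
      rw [List.length_cons, List.range_succ_eq_map, List.map_cons, List.sum_cons, List.map_map]
      have h0 : ((x :: t).drop (0 + 1)).countP (fun e => decide (e < (x :: t).getD 0 0)) = t.countP (fun e => decide (e < x)) := by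
        simp
      rw [h0]
      congr 1

theorem invCountB_eq_specInv (win : List Int) : invCountB win = specInv win := by
  rw [specInv_eq_invSum]
  unfold invCountB
  rw [PySem.List.foldl_congr_mem _ _
      (fun c a => c + (((win.drop (a + 1).toNat).countP (fun e => decide (e < PySem.List.pyGetD win a 0)) : Nat) : Int)) _ ?_]
  · rw [PySem.List.foldl_add, zero_add]
    rw [PySem.List.pyRange_one]
    rw [List.map_map]
    unfold invSum
    have hlen : ((PySem.List.len win - 0).toNat) = win.length := by
      simp [PySem.List.len_eq]
    rw [hlen]
    congr 1
    apply List.map_congr_left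
    intro a ha
    rw [List.mem_range] at ha
    simp only [Function.comp_apply, zero_add]
    have h1 : ((a : Int) + 1).toNat = a + 1 := by omega
    rw [h1]
    congr 2
    rw [PySem.List.pyGetD_natCast]
  · intro c a ha
    rw [PySem.List.mem_pyRange_one] at ha
    have hlen : PySem.List.len win = (win.length : Int) := by simp [PySem.List.len_eq]
    rw [hlen] at ha ⊢
    have h2 : (0 : Int) ≤ a + 1 := by omega
    have h3 : PySem.List.pyRange (a + 1) (win.length : Int)
        = PySem.List.pyRange (a + 1) ((win.length : Nat) : Int) := rfl
    rw [h3, PySem.List.foldl_pyRange_pyGetD' win 0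
          (fun acc e => if PySem.List.pyGetD win a 0 > e then acc + 1 else acc) c h2]
    rw [PySem.List.foldl_ite_add_one (fun e => PySem.List.pyGetD win a 0 > e) _ c]

-- ---------- ranks via the sorted distinct values ----------

theorem idxOf_mono {sv : List Int} (hpw : sv.Pairwise (· < ·)) {x y : Int}
    (hx : x ∈ sv) (hy : y ∈ sv) : x ≤ y ↔ sv.idxOf x ≤ sv.idxOf y := by
  have hgl := List.pairwise_iff_getElem.mp hpw
  have hxl : sv.idxOf x < sv.length := List.idxOf_lt_length_of_mem hx
  have hyl : sv.idxOf y < sv.length := List.idxOf_lt_length_of_mem hy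
  have hgx : sv[sv.idxOf x] = x := List.getElem_idxOf hxl
  have hgy : sv[sv.idxOf y] = y := List.getElem_idxOf hyl
  constructor
  · intro hle
    by_contra hc
    have hlt : sv.idxOf y < sv.idxOf x := by omega
    have := hgl _ _ hyl hxl hlt
    rw [hgx, hgy] at this
    omega
  · intro hle
    rcases Nat.lt_or_ge (sv.idxOf x) (sv.idxOf y) with hlt | hge
    · have := hgl _ _ hxl hyl hlt
      rw [hgx, hgy] at this
      omega
    · have heq : sv.idxOf x = sv.idxOf y := by omega
      have h1 : sv.getD (sv.idxOf x) 0 = x := by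
        rw [List.getD_eq_getElem?_getD, List.getElem?_eq_getElem hxl, Option.getD_some, hgx]
      have h2 : sv.getD (sv.idxOf y) 0 = y := by
        rw [List.getD_eq_getElem?_getD, List.getElem?_eq_getElem hyl, Option.getD_some, hgy]
      have : x = y := by rw [← h1, ← h2, heq]
      omega

theorem idxOf_strict_mono {sv : List Int} (hpw : sv.Pairwise (· < ·)) {x y : Int}
    (hx : x ∈ sv) (hy : y ∈ sv) : x < y ↔ sv.idxOf x < sv.idxOf y := by
  have h1 := idxOf_mono hpw hx hy
  have h2 := idxOf_mono hpw hy hx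
  constructor <;> intro h <;> omega

-- ---------- the comp dict ----------

theorem get?_fold_insert_notmem (l : List (Int × Int)) (d : PySem.Dict Int Int) (x : Int)
    (hx : x ∉ l.map (·.2)) :
    (l.foldl (fun d iv => d.insert iv.2 (iv.1 + 1)) d).get? x = d.get? x := by
  induction l generalizing d with
  | nil => rfl
  | cons p t ih =>
      rw [List.foldl_cons]
      rw [List.map_cons] at hx
      have hx1 : x ≠ p.2 := fun h => hx (by rw [h]; exact List.mem_cons_self)
      have hx2 : x ∉ t.map (·.2) := fun h => hx (List.mem_cons_of_mem _ h)
      rw [ih _ hx2, PySem.Dict.get?_insert_of_ne _ _ hx1]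

theorem get?_comp_enumerate (sv : List Int) (hnd : sv.Nodup) (x : Int) (hx : x ∈ sv) :
    ∀ (s : Int) (d : PySem.Dict Int Int),
      ((PySem.List.enumerate sv s).foldl (fun d iv => d.insert iv.2 (iv.1 + 1)) d).get? x
        = some (s + (sv.idxOf x : Int) + 1) := by
  induction sv with
  | nil => cases hx
  | cons y t ih =>
      intro s d
      rw [PySem.List.enumerate_cons, List.foldl_cons]
      by_cases hxy : x = y
      · subst hxy
        have hxt : x ∉ t := (List.nodup_cons.mp hnd).1
        have hmap : x ∉ (PySem.List.enumerate t (s + 1)).map (·.2) := by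
          rw [PySem.List.map_snd_enumerate]; exact hxt
        rw [get?_fold_insert_notmem _ _ _ hmap, PySem.Dict.get?_insert_self]
        rw [List.idxOf_cons_self]
        norm_num
      · rcases List.mem_cons.mp hx with h | hxt
        · exact absurd h hxy
        · rw [ih (List.nodup_cons.mp hnd).2 hxt (s + 1) _]
          rw [List.idxOf_cons_ne _ (fun h => hxy h.symm)]
          congr 1
          push_cast
          ring

-- ---------- the window / tree invariant ----------

def TreeOK (sv tree w : List Int) : Prop :=
  tree.length = sv.length + 1 ∧
  ∀ d : Nat, d ≤ sv.length →
    fenwQuery tree 0 (d : Int) = ((w.countP (fun e => decide (sv.idxOf e < d)) : Nat) : Int)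

theorem countP_gt_eq (l : List Int) (x : Int) :
    ((l.countP (fun e => decide (x < e)) : Nat) : Int)
      = (l.length : Int) - ((l.countP (fun e => decide (e ≤ x)) : Nat) : Int) := by
  have h := countP_compl l (fun e => decide (e ≤ x))
  have h2 : l.countP (fun e => !decide (e ≤ x)) = l.countP (fun e => decide (x < e)) := by
    apply List.countP_congr
    intro e _
    simp [not_le]
  rw [h2] at h
  omega

theorem TreeOK_query_le {sv tree w : List Int} (hpw : sv.Pairwise (· < ·))
    (ht : TreeOK sv tree w) (hw : ∀ e ∈ w, e ∈ sv) {x : Int} (hx : x ∈ sv) :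
    fenwQuery tree 0 ((sv.idxOf x : Int) + 1)
      = ((w.countP (fun e => decide (e ≤ x)) : Nat) : Int) := by
  have hlt : sv.idxOf x < sv.length := List.idxOf_lt_length_of_mem hx
  have h1 : ((sv.idxOf x : Int) + 1) = ((sv.idxOf x + 1 : Nat) : Int) := by push_cast; ring
  rw [h1, ht.2 (sv.idxOf x + 1) (by omega)]
  have hc : w.countP (fun e => decide (sv.idxOf e < sv.idxOf x + 1))
      = w.countP (fun e => decide (e ≤ x)) := by
    apply List.countP_congr
    intro e he
    simp only [decide_eq_true_eq]
    have := idxOf_mono hpw (hw e he) hx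
    omega
  rw [hc]

theorem TreeOK_query_lt {sv tree w : List Int} (hpw : sv.Pairwise (· < ·))
    (ht : TreeOK sv tree w) (hw : ∀ e ∈ w, e ∈ sv) {x : Int} (hx : x ∈ sv) :
    fenwQuery tree 0 ((sv.idxOf x : Int))
      = ((w.countP (fun e => decide (e < x)) : Nat) : Int) := by
  have hlt : sv.idxOf x < sv.length := List.idxOf_lt_length_of_mem hx
  rw [ht.2 (sv.idxOf x) (by omega)]
  have hc : w.countP (fun e => decide (sv.idxOf e < sv.idxOf x))
      = w.countP (fun e => decide (e < x)) := by
    apply List.countP_congr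
    intro e he
    simp only [decide_eq_true_eq]
    have := idxOf_strict_mono hpw (hw e he) hx
    omega
  rw [hc]

theorem TreeOK_add {sv tree w : List Int} (ht : TreeOK sv tree w) {x : Int} (hx : x ∈ sv) :
    TreeOK sv (fenwUpdate (sv.length : Int) tree ((sv.idxOf x : Int) + 1) 1) (w ++ [x]) := by
  have hlt : sv.idxOf x < sv.length := List.idxOf_lt_length_of_mem hx
  constructor
  · rw [fenwUpdate_length]; exact ht.1
  · intro d hd
    have h1 : ((sv.idxOf x : Int) + 1) = ((sv.idxOf x + 1 : Nat) : Int) := by push_cast; ring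
    rw [h1, fenwQuery_fenwUpdate sv.length tree (sv.idxOf x + 1) 1 d ht.1 (by omega) (by omega) hd]
    rw [ht.2 d hd, List.countP_append, List.countP_singleton]
    by_cases h : sv.idxOf x < d
    · simp [h, show sv.idxOf x + 1 ≤ d by omega]
    · simp [h, show ¬ (sv.idxOf x + 1 ≤ d) by omega]

theorem TreeOK_remove {sv tree w : List Int} {x : Int} (ht : TreeOK sv tree (x :: w))
    (hx : x ∈ sv) :
    TreeOK sv (fenwUpdate (sv.length : Int) tree ((sv.idxOf x : Int) + 1) (-1)) w := by
  have hlt : sv.idxOf x < sv.length := List.idxOf_lt_length_of_mem hx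
  constructor
  · rw [fenwUpdate_length]; exact ht.1
  · intro d hd
    have h1 : ((sv.idxOf x : Int) + 1) = ((sv.idxOf x + 1 : Nat) : Int) := by push_cast; ring
    rw [h1, fenwQuery_fenwUpdate sv.length tree (sv.idxOf x + 1) (-1) d ht.1 (by omega) (by omega) hd]
    rw [ht.2 d hd, List.countP_cons]
    by_cases h : sv.idxOf x < d
    · simp [h, show sv.idxOf x + 1 ≤ d by omega]
    · simp [h, show ¬ (sv.idxOf x + 1 ≤ d) by omega]

-- ---------- the two loops, with the dict lookups resolved to ranks ----------

def bodyBuild (nums sv : List Int) (st : List Int × Int) (i : Int) : List Int × Int :=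
  let x := PySem.List.pyGetD nums i 0
  (fenwUpdate (sv.length : Int) st.1 ((sv.idxOf x : Int) + 1) 1,
   st.2 + (i - fenwQuery st.1 0 ((sv.idxOf x : Int) + 1)))

def slideInv (nums sv : List Int) (k : Int) (st : List Int × Int × Int) (i : Int) : Int :=
  st.2.1 - fenwQuery st.1 0 ((sv.idxOf (PySem.List.pyGetD nums i 0) : Int)) +
    ((k - 1) - fenwQuery
      (fenwUpdate (sv.length : Int) st.1 ((sv.idxOf (PySem.List.pyGetD nums i 0) : Int) + 1) (-1))
      0 ((sv.idxOf (PySem.List.pyGetD nums (i + k) 0) : Int) + 1))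

def bodySlide (nums sv : List Int) (k : Int) (st : List Int × Int × Int) (i : Int) :
    List Int × Int × Int :=
  (fenwUpdate (sv.length : Int)
      (fenwUpdate (sv.length : Int) st.1 ((sv.idxOf (PySem.List.pyGetD nums i 0) : Int) + 1) (-1))
      ((sv.idxOf (PySem.List.pyGetD nums (i + k) 0) : Int) + 1) 1,
   slideInv nums sv k st i,
   if slideInv nums sv k st i < st.2.2 then slideInv nums sv k st i else st.2.2)

def win (nums : List Int) (k' t : Nat) : List Int := (nums.drop t).take k'

def minAns (nums : List Int) (k' t : Nat) : Int :=
  ((List.range t).map (fun r => specInv (win nums k' (r + 1)))).foldl min (specInv (win nums k' 0))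

theorem minAns_succ (nums : List Int) (k' t : Nat) :
    minAns nums k' (t + 1) = min (minAns nums k' t) (specInv (win nums k' (t + 1))) := by
  unfold minAns
  rw [List.range_succ, List.map_append, List.foldl_append]
  rfl

theorem ite_min (a b : Int) : (if b < a then b else a) = min a b := by
  rw [min_def]
  split_ifs <;> omega

theorem buildLoop (nums sv : List Int) (hpw : sv.Pairwise (· < ·))
    (hmem : ∀ e ∈ nums, e ∈ sv) :
    ∀ j : Nat, j ≤ nums.length →
      TreeOK sv ((PySem.List.pyRange 0 (j : Int)).foldl (bodyBuild nums sv)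
          (List.replicate (sv.length + 1) 0, 0)).1 (nums.take j) ∧
      ((PySem.List.pyRange 0 (j : Int)).foldl (bodyBuild nums sv)
          (List.replicate (sv.length + 1) 0, 0)).2 = specInv (nums.take j) := by
  intro j
  induction j with
  | zero =>
      intro _
      rw [PySem.List.pyRange_one_eq_nil (by omega), List.foldl_nil]
      refine ⟨⟨by simp, fun d hd => ?_⟩, rfl⟩
      rw [fenwQuery_replicate]
      simp
  | succ j ih =>
      intro hj
      obtain ⟨ihT, ihI⟩ := ih (by omega)
      have hjl : j < nums.length := by omega
      have hcast : (((j + 1 : Nat)) : Int) = (j : Int) + 1 := by push_cast; ring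
      rw [hcast, PySem.List.pyRange_one_succ_right (by omega), List.foldl_append, List.foldl_cons,
        List.foldl_nil]
      have hx : PySem.List.pyGetD nums (j : Int) 0 = nums[j] := by
        rw [PySem.List.pyGetD_eq_getElem nums 0 (by omega) (by omega)]
        simp [show ((j : Int)).toNat = j by omega]
      have hxm : nums[j] ∈ sv := hmem _ (List.getElem_mem hjl)
      have hwm : ∀ e ∈ nums.take j, e ∈ sv := fun e he => hmem e (List.mem_of_mem_take he)
      have htake : nums.take (j + 1) = nums.take j ++ [nums[j]] := by
        rw [List.take_add_one, List.getElem?_eq_getElem hjl]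
        rfl
      set SB := (PySem.List.pyRange 0 (j : Int)).foldl (bodyBuild nums sv)
          (List.replicate (sv.length + 1) 0, 0) with hSB
      have hbody : bodyBuild nums sv SB (j : Int)
          = (fenwUpdate (sv.length : Int) SB.1 ((sv.idxOf nums[j] : Int) + 1) 1,
             SB.2 + ((j : Int) - fenwQuery SB.1 0 ((sv.idxOf nums[j] : Int) + 1))) := by
        unfold bodyBuild
        rw [hx]
      rw [hbody]
      constructor
      · show TreeOK sv (fenwUpdate (sv.length : Int) SB.1 ((sv.idxOf nums[j] : Int) + 1) 1) _
        rw [htake]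
        exact TreeOK_add ihT hxm
      · show SB.2 + ((j : Int) - fenwQuery SB.1 0 ((sv.idxOf nums[j] : Int) + 1)) = _
        rw [ihI, htake, specInv_append, TreeOK_query_le hpw ihT hwm hxm, countP_gt_eq]
        have hlen : (nums.take j).length = j := by
          rw [List.length_take]
          omega
        rw [hlen]

theorem slideLoop (nums sv : List Int) (k' : Nat) (hpw : sv.Pairwise (· < ·))
    (hmem : ∀ e ∈ nums, e ∈ sv) (hk1 : 1 ≤ k') (hkn : k' ≤ nums.length)
    (tree0 : List Int)
    (h0T : TreeOK sv tree0 (win nums k' 0)) :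
    ∀ t : Nat, t ≤ nums.length - k' →
      TreeOK sv ((PySem.List.pyRange 0 (t : Int)).foldl (bodySlide nums sv (k' : Int))
          (tree0, specInv (win nums k' 0), specInv (win nums k' 0))).1 (win nums k' t) ∧
      ((PySem.List.pyRange 0 (t : Int)).foldl (bodySlide nums sv (k' : Int))
          (tree0, specInv (win nums k' 0), specInv (win nums k' 0))).2.1 = specInv (win nums k' t) ∧
      ((PySem.List.pyRange 0 (t : Int)).foldl (bodySlide nums sv (k' : Int))
          (tree0, specInv (win nums k' 0), specInv (win nums k' 0))).2.2 = minAns nums k' t := by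
  intro t
  induction t with
  | zero =>
      intro _
      rw [PySem.List.pyRange_one_eq_nil (by omega), List.foldl_nil]
      exact ⟨h0T, rfl, rfl⟩
  | succ t ih =>
      intro ht
      obtain ⟨ihT, ihI, ihA⟩ := ih (by omega)
      have htl : t < nums.length := by omega
      have htk : t + k' < nums.length := by omega
      have hcast : (((t + 1 : Nat)) : Int) = (t : Int) + 1 := by push_cast; ring
      rw [hcast, PySem.List.pyRange_one_succ_right (by omega), List.foldl_append, List.foldl_cons,
        List.foldl_nil]
      set ST := (PySem.List.pyRange 0 (t : Int)).foldl (bodySlide nums sv (k' : Int))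
          (tree0, specInv (win nums k' 0), specInv (win nums k' 0)) with hST
      -- decompose the current window
      have hwt : win nums k' t = nums[t] :: (nums.drop (t + 1)).take (k' - 1) := by
        unfold win
        rw [List.drop_eq_getElem_cons htl]
        conv_lhs => rw [show k' = (k' - 1) + 1 by omega]
        rw [List.take_succ_cons]
      set w' : List Int := (nums.drop (t + 1)).take (k' - 1) with hw'
      have hw'len : w'.length = k' - 1 := by
        rw [hw', List.length_take, List.length_drop]
        omega
      have hwin1 : win nums k' (t + 1) = w' ++ [nums[t + k']] := by
        unfold win
        conv_lhs => rw [show k' = (k' - 1) + 1 by omega]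
        rw [List.take_add_one]
        congr 1
        rw [List.getElem?_drop, show t + 1 + (k' - 1) = t + k' by omega,
          List.getElem?_eq_getElem htk]
        rfl
      have hx : PySem.List.pyGetD nums (t : Int) 0 = nums[t] := by
        rw [PySem.List.pyGetD_eq_getElem nums 0 (by omega) (by omega)]
        simp [show ((t : Int)).toNat = t by omega]
      have hy : PySem.List.pyGetD nums ((t : Int) + (k' : Int)) 0 = nums[t + k'] := by
        have h1 : ((t : Int) + (k' : Int)) = ((t + k' : Nat) : Int) := by push_cast; ring
        rw [h1, PySem.List.pyGetD_eq_getElem nums 0 (by omega) (by omega)]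
        simp [show ((t : Int) + (k' : Int)).toNat = t + k' by omega]
      have hxm : nums[t] ∈ sv := hmem _ (List.getElem_mem htl)
      have hym : nums[t + k'] ∈ sv := hmem _ (List.getElem_mem htk)
      have hwtm : ∀ e ∈ win nums k' t, e ∈ sv := fun e he =>
        hmem e (List.mem_of_mem_drop (List.mem_of_mem_take he))
      have hw'm : ∀ e ∈ w', e ∈ sv := fun e he =>
        hmem e (List.mem_of_mem_drop (List.mem_of_mem_take he))
      have hless : fenwQuery ST.1 0 ((sv.idxOf nums[t] : Int))
          = (((win nums k' t).countP (fun e => decide (e < nums[t])) : Nat) : Int) :=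
        TreeOK_query_lt hpw ihT hwtm hxm
      have hremT : TreeOK sv
          (fenwUpdate (sv.length : Int) ST.1 ((sv.idxOf nums[t] : Int) + 1) (-1)) w' := by
        apply TreeOK_remove _ hxm
        rw [← hwt]
        exact ihT
      have hinv1 : specInv (win nums k' t)
            - (((win nums k' t).countP (fun e => decide (e < nums[t])) : Nat) : Int)
          = specInv w' := by
        rw [hwt, List.countP_cons]
        show (w'.countP (fun e => decide (e < nums[t])) : Int) + specInv w' - _ = _
        simp
      have hgreater : fenwQuery
            (fenwUpdate (sv.length : Int) ST.1 ((sv.idxOf nums[t] : Int) + 1) (-1))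
            0 ((sv.idxOf nums[t + k'] : Int) + 1)
          = ((w'.countP (fun e => decide (e ≤ nums[t + k'])) : Nat) : Int) :=
        TreeOK_query_le hpw hremT hw'm hym
      have haddT := TreeOK_add hremT hym
      rw [← hwin1] at haddT
      have hsl : slideInv nums sv (k' : Int) ST (t : Int) = specInv (win nums k' (t + 1)) := by
        unfold slideInv
        rw [hx, hy, hless, ihI, hinv1, hgreater, hwin1, specInv_append, countP_gt_eq, hw'len,
          Nat.cast_sub hk1]
        push_cast
        ring
      have hbody : bodySlide nums sv (k' : Int) ST (t : Int)
          = (fenwUpdate (sv.length : Int)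
               (fenwUpdate (sv.length : Int) ST.1 ((sv.idxOf nums[t] : Int) + 1) (-1))
               ((sv.idxOf nums[t + k'] : Int) + 1) 1,
             specInv (win nums k' (t + 1)),
             if specInv (win nums k' (t + 1)) < ST.2.2 then specInv (win nums k' (t + 1))
               else ST.2.2) := by
        unfold bodySlide
        rw [hsl, hx, hy]
      rw [hbody]
      refine ⟨?_, rfl, ?_⟩
      · exact haddT
      · show (if specInv (win nums k' (t + 1)) < ST.2.2 then specInv (win nums k' (t + 1))
            else ST.2.2) = _
        rw [ihA, ite_min, minAns_succ]

-- ---------- evaluating the two ports ----------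

theorem altEval (nums : List Int) (k : Int) (hk2 : 2 ≤ k) (hkn : k ≤ (nums.length : Int)) :
    minInversionCount_alt nums k = minAns nums k.toNat (nums.length - k.toNat) := by
  have hne : ¬ k ≤ 1 := by omega
  simp only [minInversionCount_alt, if_neg hne]
  set k' := k.toNat with hk'
  have hlen : PySem.List.len nums = (nums.length : Int) := by simp
  have hinit : invCountB (PySem.List.slice nums (some 0) (some k)) = specInv (win nums k' 0) := by
    rw [invCountB_eq_specInv]
    congr 1
    rw [PySem.List.slice_zero_start, PySem.List.slice_to nums (by omega)]
    unfold win
    rw [List.drop_zero]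
  have hrange : PySem.List.len nums - k + 1 = (((nums.length - k' : Nat) : Int)) + 1 := by
    rw [hlen]; omega
  rw [hrange, hinit, PySem.List.pyRange_one 1 _]
  have htn : ((((nums.length - k' : Nat) : Int)) + 1 - 1).toNat = nums.length - k' := by omega
  rw [htn, List.foldl_map]
  unfold minAns
  rw [List.foldl_map]
  apply PySem.List.foldl_congr_mem
  intro acc r hr
  rw [List.mem_range] at hr
  congr 1
  rw [invCountB_eq_specInv]
  congr 1
  rw [PySem.List.slice_toNat nums (by omega) (by omega)]
  unfold win
  rw [show ((1 : Int) + (r : Int) + k).toNat - ((1 : Int) + (r : Int)).toNat = k' by omega,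
    show ((1 : Int) + (r : Int)).toNat = r + 1 by omega]

theorem portAEval (nums : List Int) (k : Int) (hk2 : 2 ≤ k) (hkn : k ≤ (nums.length : Int)) :
    minInversionCount nums k = minAns nums k.toNat (nums.length - k.toNat) := by
  have hne : ¬ k ≤ 1 := by omega
  simp only [minInversionCount, if_neg hne]
  set k' := k.toNat with hk'
  set sv := PySem.List.sorted (PySem.Set.ofList nums) (fun v => v) with hsv
  set compD := (PySem.List.enumerate sv 0).foldl
    (fun d iv => d.insert iv.2 (iv.1 + 1)) (PySem.Dict.empty (κ := Int) (ν := Int)) with hcompD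
  have hpw : sv.Pairwise (· < ·) := PySem.List.sorted_ofList_pairwise_lt nums
  have hmem : ∀ e ∈ nums, e ∈ sv := by
    intro e he
    rw [hsv, PySem.List.mem_sorted, PySem.Set.mem_ofList]
    exact he
  have hnd : sv.Nodup := hpw.imp (fun h => ne_of_lt h)
  have hcompEq : ∀ x ∈ sv, ((compD.get? x).getD 0) = (sv.idxOf x : Int) + 1 := by
    intro x hx
    rw [hcompD, get?_comp_enumerate sv hnd x hx 0 _, Option.getD_some]
    ring
  have hm : PySem.List.len sv = (sv.length : Int) := by simp
  have hkk : k = ((k' : Nat) : Int) := by omega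
  have hk'n : k' ≤ nums.length := by omega
  rw [hkk, hm, Int.toNat_natCast]
  have hrange2 : PySem.List.len nums - ((k' : Nat) : Int) = (((nums.length - k' : Nat)) : Int) := by
    simp
    omega
  rw [hrange2]
  have hbf : (PySem.List.pyRange 0 ((k' : Nat) : Int)).foldl
        (buildStep nums compD ((sv.length : Nat) : Int)) (List.replicate (sv.length + 1) 0, 0)
      = (PySem.List.pyRange 0 ((k' : Nat) : Int)).foldl (bodyBuild nums sv)
        (List.replicate (sv.length + 1) 0, 0) := by
    apply PySem.List.foldl_congr_mem
    intro acc i hi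
    rw [PySem.List.mem_pyRange_one] at hi
    have hin : PySem.Raise.InRange nums.length i := by
      constructor <;> omega
    have hx := PySem.List.pyGetD_mem nums 0 hin
    simp only [buildStep, bodyBuild]
    rw [hcompEq _ (hmem _ hx)]
  rw [hbf]
  obtain ⟨hT1, hI1⟩ := buildLoop nums sv hpw hmem k' hk'n
  have hwin0 : nums.take k' = win nums k' 0 := by
    unfold win
    rw [List.drop_zero]
  rw [hwin0] at hT1 hI1
  rw [hI1]
  have hsf : (PySem.List.pyRange 0 (((nums.length - k' : Nat)) : Int)).foldl
        (slideStep nums compD ((sv.length : Nat) : Int) ((k' : Nat) : Int))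
        (((PySem.List.pyRange 0 ((k' : Nat) : Int)).foldl (bodyBuild nums sv)
            (List.replicate (sv.length + 1) 0, 0)).1,
          specInv (win nums k' 0), specInv (win nums k' 0))
      = (PySem.List.pyRange 0 (((nums.length - k' : Nat)) : Int)).foldl
        (bodySlide nums sv ((k' : Nat) : Int))
        (((PySem.List.pyRange 0 ((k' : Nat) : Int)).foldl (bodyBuild nums sv)
            (List.replicate (sv.length + 1) 0, 0)).1,
          specInv (win nums k' 0), specInv (win nums k' 0)) := by
    apply PySem.List.foldl_congr_mem
    intro acc i hi
    rw [PySem.List.mem_pyRange_one] at hi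
    have hinx : PySem.Raise.InRange nums.length i := by
      constructor <;> omega
    have hiny : PySem.Raise.InRange nums.length (i + ((k' : Nat) : Int)) := by
      constructor <;> omega
    have hx := PySem.List.pyGetD_mem nums 0 hinx
    have hy := PySem.List.pyGetD_mem nums 0 hiny
    simp only [slideStep, bodySlide, slideInv]
    rw [hcompEq _ (hmem _ hx), hcompEq _ (hmem _ hy)]
    norm_num
  rw [hsf]
  exact (slideLoop nums sv k' hpw hmem (by omega) hk'n _ hT1 (nums.length - k') le_rfl).2.2

-- ===== VERDICT (by name: the statement is the Claim_ definition above) =====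
theorem minInversionCount_spec : Claim_equal_minInversionCount := by
  intro nums k _hdom hpre
  unfold Spec_minInversionCount
  by_cases hk1 : k ≤ 1
  · unfold minInversionCount minInversionCount_alt
    rw [if_pos hk1, if_pos hk1]
  · have hkn : k ≤ (nums.length : Int) := by
      rcases hpre with h | h
      · omega
      · exact_mod_cast h
    rw [portAEval nums k (by omega) hkn, altEval nums k (by omega) hkn]
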